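-- pv_equiv track=rewrite | github.com/diwakar-1255/AI-Interview-Coach | backend/app.py | merge_answers_lists
-- ===== SOURCE A (Python) =====
-- def merge_answers_lists(existing_answers, incoming_answers):
--     merged = existing_answers[:]
--     if not isinstance(incoming_answers, list):
--         return merged
--     while len(merged) < len(incoming_answers):
--         merged.append("")
--     for i, item in enumerate(incoming_answers):
--         if item is not None and str(item).strip() != "":
--             merged[i] = item
--     return merged
-- ===== SOURCE B (Python) =====
-- def merge_answers_lists(existing_answers, incoming_answers):
--     # build an index of the non-blank incoming answers once, then materialize
--     # the result by position with dict lookups (existing value / "" as fallback)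
--     if not isinstance(incoming_answers, list):
--         return existing_answers[:]
--     overrides = {i: item for i, item in enumerate(incoming_answers)
--                  if item is not None and str(item).strip() != ""}
--     n = max(len(existing_answers), len(incoming_answers))
--     return [overrides[i] if i in overrides
--             else (existing_answers[i] if i < len(existing_answers) else "")
--             for i in range(n)]
-- ===== Notes on version B (the rewrite author's own statement) =====
-- stated objective: alternative
-- what changed: Instead of copying the existing list, padding it and overwriting in place, B first builds a dict index of the non-blank incoming answers and then materializes a fresh list by position, looking each index up in that dict with the existing answer (or "") as fallback.
import Mathlib
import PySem

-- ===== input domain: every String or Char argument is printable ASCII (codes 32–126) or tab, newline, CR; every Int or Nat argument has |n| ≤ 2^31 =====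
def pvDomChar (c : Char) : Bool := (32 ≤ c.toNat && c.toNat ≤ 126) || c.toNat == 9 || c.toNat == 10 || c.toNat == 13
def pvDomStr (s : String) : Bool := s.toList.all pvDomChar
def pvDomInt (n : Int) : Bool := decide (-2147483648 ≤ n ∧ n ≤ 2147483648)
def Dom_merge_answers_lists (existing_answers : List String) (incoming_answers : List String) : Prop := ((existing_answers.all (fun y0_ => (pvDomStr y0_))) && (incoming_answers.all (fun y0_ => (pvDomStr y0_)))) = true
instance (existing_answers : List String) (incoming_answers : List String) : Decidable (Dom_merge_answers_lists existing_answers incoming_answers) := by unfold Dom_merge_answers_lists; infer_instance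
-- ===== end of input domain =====

-- B replaces A's copy-pad-overwrite of the existing list by building a dict index
-- of the non-blank incoming answers and materializing a fresh list by lookup; objective: alternative.

-- ===== PORT A =====
-- body of A's 'for i, item in enumerate(incoming_answers)' loop: overwrite merged[i] when item is non-blank
def mergeStep (m : List String) (p : Int × String) : List String :=
  if PySem.Str.strip p.2 ≠ "" then m.set p.1.toNat p.2 else m

def merge_answers_lists (existing_answers : List String) (incoming_answers : List String) : List String :=
  -- merged = existing_answers[:]; (isinstance check is always true for List String);
  -- while len(merged) < len(incoming_answers): merged.append("")  ⇒ pad with replicate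
  let merged := existing_answers ++ List.replicate (incoming_answers.length - existing_answers.length) ""
  (PySem.List.enumerate incoming_answers).foldl mergeStep merged

-- ===== PORT B =====
-- B-side helpers: the dict comprehension over the filtered enumeration, and the
-- element expression of B's list comprehension (dict lookup with fallback)
def altOverrides (incoming_answers : List String) : PySem.Dict Int String :=
  ((PySem.List.enumerate incoming_answers).filter
      (fun p => decide (PySem.Str.strip p.2 ≠ ""))).foldl
    (fun d p => d.insert p.1 p.2) PySem.Dict.empty

def altPick (overrides : PySem.Dict Int String) (existing_answers : List String) (i : Int) : String :=
  match overrides.get? i with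
  | some v => v
  | none => if i < (existing_answers.length : Int)
            then PySem.List.pyGetD existing_answers i "" else ""

def merge_answers_lists_alt (existing_answers : List String) (incoming_answers : List String) : List String :=
  let overrides := altOverrides incoming_answers
  let n : Int := max (existing_answers.length : Int) (incoming_answers.length : Int)
  (PySem.List.pyRange 0 n 1).map (altPick overrides existing_answers)

-- ===== PRECONDITION & SPEC =====
def Spec_merge_answers_lists (existing_answers : List String) (incoming_answers : List String) (out : List String) : Prop := out = merge_answers_lists_alt existing_answers incoming_answers
instance (existing_answers : List String) (incoming_answers : List String) (out : List String) : Decidable (Spec_merge_answers_lists existing_answers incoming_answers out) := by unfold Spec_merge_answers_lists; infer_instance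

-- ===== CLAIM (what is proved, stated in full; the proofs are below) =====
def Claim_equal_merge_answers_lists : Prop := ∀ (existing_answers : List String) (incoming_answers : List String), Dom_merge_answers_lists existing_answers incoming_answers → Spec_merge_answers_lists existing_answers incoming_answers (merge_answers_lists existing_answers incoming_answers)

-- ===== LEMMAS AND PROOFS =====

-- proof-only reference function: the common value of both ports
def mergeGo : List String → List String → List String
  | [], [] => []
  | [], y :: ys => (if PySem.Str.strip y ≠ "" then y else "") :: mergeGo [] ys
  | x :: xs, [] => x :: mergeGo xs []
  | x :: xs, y :: ys => (if PySem.Str.strip y ≠ "" then y else x) :: mergeGo xs ys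

theorem mergeGo_nil (e : List String) : mergeGo e [] = e := by
  induction e with
  | nil => simp [mergeGo]
  | cons x xs ih => simp [mergeGo, ih]

-- ---------- A = mergeGo ----------

-- the overwrite fold at shifted indices leaves the head alone
theorem fold_shift (inc : List String) : ∀ (s : ℕ) (a : String) (m : List String),
    (PySem.List.enumerate inc ((s : Int) + 1)).foldl mergeStep (a :: m)
      = a :: (PySem.List.enumerate inc (s : Int)).foldl mergeStep m := by
  induction inc with
  | nil => intro s a m; simp [PySem.List.enumerate_nil]
  | cons y ys ih =>
    intro s a m
    rw [PySem.List.enumerate_cons, PySem.List.enumerate_cons]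
    simp only [List.foldl_cons]
    have h1 : ((s : Int) + 1).toNat = s + 1 := by omega
    have h2 : ((s : Int) + 1 + 1) = ((s + 1 : ℕ) : Int) + 1 := by push_cast; ring
    have h3 : ((s : Int)).toNat = s := by omega
    by_cases h : PySem.Str.strip y = ""
    · simp only [mergeStep, h, ne_eq, not_true_eq_false, if_false]
      rw [h2, ih]
      push_cast; ring_nf
    · simp only [mergeStep, ne_eq, h, not_false_eq_true, if_pos, h1, h3,
        List.set_cons_succ]
      rw [h2, ih]
      push_cast; ring_nf

theorem merge_eq (incoming_answers : List String) :
    ∀ existing_answers, merge_answers_lists existing_answers incoming_answers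
      = mergeGo existing_answers incoming_answers := by
  induction incoming_answers with
  | nil =>
    intro e
    simp [merge_answers_lists, PySem.List.enumerate_nil, mergeGo_nil]
  | cons y ys ih =>
    intro e
    cases e with
    | nil =>
      show (PySem.List.enumerate (y :: ys) 0).foldl mergeStep
        ([] ++ List.replicate ((y :: ys).length - 0) "") = _
      rw [PySem.List.enumerate_cons]
      simp only [List.nil_append, List.length_cons, Nat.sub_zero, List.replicate_succ,
        List.foldl_cons]
      have hs : (0 : Int) + 1 = ((0 : ℕ) : Int) + 1 := by norm_num
      by_cases h : PySem.Str.strip y = ""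
      · simp only [mergeStep, h, ne_eq, not_true_eq_false, if_false]
        rw [hs, fold_shift]
        have := ih []
        simp only [merge_answers_lists, List.nil_append, List.length_nil, Nat.sub_zero] at this
        simp [mergeGo, h, this]
      · simp only [mergeStep, ne_eq, h, not_false_eq_true, if_pos]
        have : ((0 : Int)).toNat = 0 := rfl
        rw [this, List.set_cons_zero, hs, fold_shift]
        have := ih []
        simp only [merge_answers_lists, List.nil_append, List.length_nil, Nat.sub_zero] at this
        simp [mergeGo, h, this]
    | cons x xs =>
      show (PySem.List.enumerate (y :: ys) 0).foldl mergeStep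
        ((x :: xs) ++ List.replicate ((y :: ys).length - (x :: xs).length) "") = _
      rw [PySem.List.enumerate_cons]
      simp only [List.length_cons, Nat.succ_sub_succ, List.cons_append, List.foldl_cons]
      have hs : (0 : Int) + 1 = ((0 : ℕ) : Int) + 1 := by norm_num
      by_cases h : PySem.Str.strip y = ""
      · simp only [mergeStep, h, ne_eq, not_true_eq_false, if_false]
        rw [hs, fold_shift]
        have := ih xs
        simp only [merge_answers_lists] at this
        simp [mergeGo, h, this]
      · simp only [mergeStep, ne_eq, h, not_false_eq_true, if_pos]
        have h0 : ((0 : Int)).toNat = 0 := rfl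
        rw [h0, List.set_cons_zero, hs, fold_shift]
        have := ih xs
        simp only [merge_answers_lists] at this
        simp [mergeGo, h, this]

-- ---------- B = mergeGo ----------

theorem strip_empty : PySem.Str.strip "" = "" := by decide

theorem length_mergeGo : ∀ (e inc : List String),
    (mergeGo e inc).length = max e.length inc.length := by
  intro e
  induction e with
  | nil =>
    intro inc
    induction inc with
    | nil => simp [mergeGo]
    | cons y ys ih => simp [mergeGo, ih]
  | cons x xs ih =>
    intro inc
    cases inc with
    | nil => simp [mergeGo_nil]
    | cons y ys =>
      simp [mergeGo, ih ys]

theorem mergeGo_getD : ∀ (e inc : List String) (k : ℕ),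
    (mergeGo e inc).getD k ""
      = if PySem.Str.strip (inc.getD k "") = "" then e.getD k "" else inc.getD k "" := by
  intro e
  induction e with
  | nil =>
    intro inc
    induction inc with
    | nil => intro k; simp [mergeGo, strip_empty]
    | cons y ys ih =>
      intro k
      cases k with
      | zero => by_cases h : PySem.Str.strip y = "" <;> simp [mergeGo, h]
      | succ k =>
        by_cases h : PySem.Str.strip y = "" <;>
          simpa [mergeGo, h] using ih k
  | cons x xs ih =>
    intro inc
    cases inc with
    | nil => intro k; simp [mergeGo_nil, strip_empty]
    | cons y ys =>
      intro k
      cases k with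
      | zero => by_cases h : PySem.Str.strip y = "" <;> simp [mergeGo, h]
      | succ k =>
        by_cases h : PySem.Str.strip y = "" <;>
          simpa [mergeGo, h] using ih ys k

-- lookup in the dict built by folding insert over the filtered enumeration,
-- proved by direct induction on the incoming list with a shifted start index
theorem foldl_ins_get? : ∀ (inc : List String) (s : Int) (d : PySem.Dict Int String) (x : Int),
    (((PySem.List.enumerate inc s).filter
        (fun p => decide (PySem.Str.strip p.2 ≠ ""))).foldl
      (fun d p => d.insert p.1 p.2) d).get? x
      = if s ≤ x ∧ x < s + inc.length ∧ PySem.Str.strip (inc.getD (x - s).toNat "") ≠ ""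
        then some (inc.getD (x - s).toNat "")
        else d.get? x := by
  intro inc
  induction inc with
  | nil =>
    intro s d x
    rw [PySem.List.enumerate_nil]
    simp only [List.filter_nil, List.foldl_nil, List.length_nil]
    rw [if_neg (by rintro ⟨h1, h2, h3⟩; omega)]
  | cons y ys ih =>
    intro s d x
    simp only [List.length_cons]
    by_cases hy : PySem.Str.strip y = ""
    · -- blank head: filtered out, dict untouched
      have hfil : (PySem.List.enumerate (y :: ys) s).filter
            (fun p => decide (PySem.Str.strip p.2 ≠ ""))
          = (PySem.List.enumerate ys (s + 1)).filter
            (fun p => decide (PySem.Str.strip p.2 ≠ "")) := by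
        rw [PySem.List.enumerate_cons, List.filter_cons]
        simp [hy]
      rw [hfil, ih (s + 1) d x]
      by_cases hxs : x = s
      · rw [hxs]
        rw [if_neg (by rintro ⟨h1, h2, h3⟩; omega),
          if_neg (by
            rintro ⟨h1, h2, h3⟩
            have h0 : (s - s).toNat = 0 := by omega
            rw [h0, List.getD_cons_zero] at h3
            exact h3 hy)]
      · by_cases hxr : s + 1 ≤ x ∧ x < s + 1 + ys.length
        · have hnat : (x - s).toNat = (x - (s + 1)).toNat + 1 := by omega
          have hgd : (y :: ys).getD (x - s).toNat "" = ys.getD (x - (s + 1)).toNat "" := by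
            rw [hnat, List.getD_cons_succ]
          by_cases hs2 : PySem.Str.strip (ys.getD (x - (s + 1)).toNat "") = ""
          · rw [if_neg (by rintro ⟨h1, h2, h3⟩; exact h3 hs2),
              if_neg (by rintro ⟨h1, h2, h3⟩; rw [hgd] at h3; exact h3 hs2)]
          · rw [if_pos ⟨hxr.1, by omega, hs2⟩,
              if_pos ⟨by omega, by omega, by rw [hgd]; exact hs2⟩, hgd]
        · rw [if_neg (by rintro ⟨h1, h2, h3⟩; omega),
            if_neg (by rintro ⟨h1, h2, h3⟩; omega)]
    · -- non-blank head: inserted with key s before the rest of the fold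
      have hfil : (PySem.List.enumerate (y :: ys) s).filter
            (fun p => decide (PySem.Str.strip p.2 ≠ ""))
          = (s, y) :: (PySem.List.enumerate ys (s + 1)).filter
            (fun p => decide (PySem.Str.strip p.2 ≠ "")) := by
        rw [PySem.List.enumerate_cons, List.filter_cons]
        simp [hy]
      rw [hfil]
      simp only [List.foldl_cons]
      rw [ih (s + 1) (d.insert s y) x]
      by_cases hxs : x = s
      · rw [hxs]
        rw [if_neg (by rintro ⟨h1, h2, h3⟩; omega),
          if_pos ⟨le_refl s, by omega, by
            have h0 : (s - s).toNat = 0 := by omega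
            rw [h0, List.getD_cons_zero]; exact hy⟩]
        have h0 : (s - s).toNat = 0 := by omega
        rw [h0, List.getD_cons_zero, PySem.Dict.get?_insert]
        rw [if_pos rfl]
      · have hins : (d.insert s y).get? x = d.get? x := by
          rw [PySem.Dict.get?_insert, if_neg hxs]
        by_cases hxr : s + 1 ≤ x ∧ x < s + 1 + ys.length
        · have hnat : (x - s).toNat = (x - (s + 1)).toNat + 1 := by omega
          have hgd : (y :: ys).getD (x - s).toNat "" = ys.getD (x - (s + 1)).toNat "" := by
            rw [hnat, List.getD_cons_succ]
          by_cases hs2 : PySem.Str.strip (ys.getD (x - (s + 1)).toNat "") = ""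
          · rw [if_neg (by rintro ⟨h1, h2, h3⟩; exact h3 hs2),
              if_neg (by rintro ⟨h1, h2, h3⟩; rw [hgd] at h3; exact h3 hs2), hins]
          · rw [if_pos ⟨hxr.1, by omega, hs2⟩,
              if_pos ⟨by omega, by omega, by rw [hgd]; exact hs2⟩, hgd]
        · rw [if_neg (by rintro ⟨h1, h2, h3⟩; omega),
            if_neg (by rintro ⟨h1, h2, h3⟩; omega), hins]

theorem altOverrides_get? (inc : List String) (k : ℕ) :
    (altOverrides inc).get? (k : Int)
      = if PySem.Str.strip (inc.getD k "") = "" then none else some (inc.getD k "") := by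
  rw [altOverrides, foldl_ins_get? inc 0 PySem.Dict.empty (k : Int)]
  have hsub : ((k : Int) - 0).toNat = k := by omega
  rw [hsub]
  by_cases hk : k < inc.length
  · by_cases h : PySem.Str.strip (inc.getD k "") = ""
    · rw [if_neg (by rintro ⟨h1, h2, h3⟩; exact h3 h), if_pos h, PySem.Dict.get?_empty]
    · rw [if_pos ⟨by omega, by omega, h⟩, if_neg h]
  · have hd : inc.getD k "" = "" := List.getD_eq_default inc "" (by omega)
    rw [if_neg (by rintro ⟨h1, h2, h3⟩; omega), if_pos (by rw [hd]; exact strip_empty),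
      PySem.Dict.get?_empty]

theorem altPick_eq (e inc : List String) (k : ℕ) :
    altPick (altOverrides inc) e (k : Int)
      = if PySem.Str.strip (inc.getD k "") = "" then e.getD k "" else inc.getD k "" := by
  rw [altPick, altOverrides_get?]
  by_cases h : PySem.Str.strip (inc.getD k "") = ""
  · rw [if_pos h, if_pos h]
    by_cases hke : k < e.length
    · rw [if_pos (by exact_mod_cast hke), PySem.List.pyGetD_natCast]
    · rw [if_neg (by exact_mod_cast hke), List.getD_eq_default e "" (by omega)]
  · rw [if_neg h, if_neg h]

theorem alt_eq (e inc : List String) :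
    merge_answers_lists_alt e inc = mergeGo e inc := by
  have hlen : (merge_answers_lists_alt e inc).length = max e.length inc.length := by
    simp only [merge_answers_lists_alt, List.length_map, PySem.List.length_pyRange_one]
    omega
  apply List.ext_getElem?
  intro k
  by_cases hk : k < max e.length inc.length
  · have hmax : max (e.length : Int) (inc.length : Int)
        = ((max e.length inc.length : ℕ) : Int) := by push_cast; rfl
    have hL : (merge_answers_lists_alt e inc)[k]?
        = some (altPick (altOverrides inc) e (k : Int)) := by
      show ((PySem.List.pyRange 0 (max (e.length : Int) (inc.length : Int)) 1).map
          (altPick (altOverrides inc) e))[k]? = _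
      rw [hmax]
      exact PySem.List.getElem?_map_pyRange_zero
        (altPick (altOverrides inc) e) (max e.length inc.length) k hk
    have hmg : k < (mergeGo e inc).length := by rw [length_mergeGo]; exact hk
    have hR : (mergeGo e inc)[k]? = some ((mergeGo e inc).getD k "") := by
      rw [List.getElem?_eq_getElem hmg, List.getD_eq_getElem _ "" hmg]
    rw [hL, hR, mergeGo_getD, altPick_eq]
  · rw [List.getElem?_eq_none (by omega : (merge_answers_lists_alt e inc).length ≤ k),
      List.getElem?_eq_none (by rw [length_mergeGo]; omega)]

-- ===== VERDICT (by name: the statement is the Claim_ definition above) =====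
theorem merge_answers_lists_spec : Claim_equal_merge_answers_lists := by
  intro e inc _
  show merge_answers_lists e inc = merge_answers_lists_alt e inc
  rw [merge_eq, alt_eq]
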